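-- pv_equiv track=rewrite | github.com/JamesJoe0830/ps-study-auto-upload | 프로그래머스/2/12973. 짝지어 제거하기/짝지어 제거하기.py | solution
-- ===== SOURCE A (Python) =====
-- def solution(s):
--     answer = 0
--     stack = []
--     for i in range(len(s)):
--         if stack :
--             if stack[-1] != s[i]:
--                 stack.append(s[i])
--             else :
--                 stack.pop()
--         else :
--             stack.append(s[i])
--     if len(stack) == 0 :
--         answer = 1
--
--
--     return answer
-- ===== SOURCE B (Python) =====
-- def solution(s):
--     cur = s
--     changed = True
--     while changed:
--         out = []
--         changed = False
--         i = 0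
--         n = len(cur)
--         while i < n:
--             if i + 1 < n and cur[i] == cur[i + 1]:
--                 i += 2
--                 changed = True
--             else:
--                 out.append(cur[i])
--                 i += 1
--         cur = ''.join(out)
--     return 1 if not cur else 0
-- ===== Notes on version B (the rewrite author's own statement) =====
-- stated objective: alternative
-- what changed: Replaces the single-pass stack with iterated full left-to-right scans, each dropping adjacent equal pairs, repeated until a pass makes no change; trades O(n) stack work for O(n^2) worst-case repeated scans of a genuinely different shape.
import Mathlib
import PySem

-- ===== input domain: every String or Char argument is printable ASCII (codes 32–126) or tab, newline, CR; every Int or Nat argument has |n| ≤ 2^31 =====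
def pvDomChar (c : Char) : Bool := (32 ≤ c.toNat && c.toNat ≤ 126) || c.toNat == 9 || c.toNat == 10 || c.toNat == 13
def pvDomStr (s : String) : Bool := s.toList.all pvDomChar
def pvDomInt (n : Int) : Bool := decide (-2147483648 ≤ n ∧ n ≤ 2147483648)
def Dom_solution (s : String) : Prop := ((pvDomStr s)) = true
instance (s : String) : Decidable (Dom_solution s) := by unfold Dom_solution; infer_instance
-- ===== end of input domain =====

-- B replaces A's single-pass stack by repeated full scans each dropping adjacent equal pairs (alternative decomposition, not faster).

-- ===== PORT A =====
-- for i in range(len(s)) with s[i]: i is always in range, so pyGetD with a default is exact here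
def solution (s : String) : Int :=
  let cs := s.toList
  let stack := (PySem.List.pyRange 0 (PySem.Str.len s) 1).foldl
    (fun stack i =>
      if stack ≠ [] then
        if PySem.List.pyGetD stack (-1) ' ' ≠ PySem.List.pyGetD cs i ' ' then
          stack ++ [PySem.List.pyGetD cs i ' ']
        else stack.dropLast
      else stack ++ [PySem.List.pyGetD cs i ' '])
    ([] : List Char)
  if stack.length = 0 then 1 else 0

-- ===== PORT B =====
-- one scan of the inner while loop: drops each adjacent equal pair, reports whether it dropped any
def passOnce : List Char → List Char × Bool
  | a :: b :: rest =>
    if a = b then ((passOnce rest).1, true)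
    else ((a :: (passOnce (b :: rest)).1), (passOnce (b :: rest)).2)
  | [a] => ([a], false)
  | [] => ([], false)

theorem passOnce_length (l : List Char) :
    (passOnce l).1.length ≤ l.length ∧ ((passOnce l).2 = true → (passOnce l).1.length < l.length) := by
  induction l using passOnce.induct with
  | case1 b rest ih =>
      simp only [passOnce]
      have := ih.1
      constructor
      · simp; omega
      · intro _; simp; omega
  | case2 a b rest hab ih =>
      simp only [passOnce, if_neg hab]
      constructor
      · simpa using Nat.succ_le_succ ih.1
      · intro h; simpa using Nat.succ_lt_succ (ih.2 h)
  | case3 a => simp [passOnce]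
  | case4 => simp [passOnce]

-- the outer while loop: repeat passes until a pass changes nothing
def reduceLoop (l : List Char) : List Char :=
  if h : (passOnce l).2 = true then reduceLoop (passOnce l).1 else (passOnce l).1
termination_by l.length
decreasing_by exact (passOnce_length l).2 h

def solution_alt (s : String) : Int :=
  if reduceLoop s.toList = [] then 1 else 0

-- ===== PRECONDITION & SPEC =====
def Spec_solution (s : String) (out : Int) : Prop := out = solution_alt s
instance (s : String) (out : Int) : Decidable (Spec_solution s out) := by unfold Spec_solution; infer_instance

-- ===== CLAIM (what is proved, stated in full; the proofs are below) =====
def Claim_equal_solution : Prop := ∀ (s : String), Dom_solution s → Spec_solution s (solution s)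

-- ===== LEMMAS AND PROOFS =====

-- A's loop body as a standalone step function
def stepA (st : List Char) (c : Char) : List Char :=
  if st.getLast? = some c then st.dropLast else st ++ [c]

theorem stepA_eq (st : List Char) (c : Char) :
    (if st ≠ [] then
        if PySem.List.pyGetD st (-1) ' ' ≠ c then st ++ [c] else st.dropLast
      else st ++ [c]) = stepA st c := by
  by_cases h : st = []
  · subst h; simp [stepA]
  · rw [if_pos h, PySem.List.pyGetD_neg_one st ' ' h]
    unfold stepA
    rcases eq_or_ne (st.getLast h) c with he | he
    · simp [he, List.getLast?_eq_some_getLast h]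
    · simp [he, List.getLast?_eq_some_getLast h]

theorem stepA_good {st : List Char} (h : st.IsChain (· ≠ ·)) (c : Char) :
    (stepA st c).IsChain (· ≠ ·) := by
  unfold stepA
  split_ifs with hl
  · exact List.IsChain.dropLast h
  · rw [List.isChain_append]
    refine ⟨h, by simp, ?_⟩
    intro x hx z hz
    simp at hz
    subst hz
    exact fun he => hl (by rw [hx, he])

theorem stepA_cancel {st : List Char} (h : st.IsChain (· ≠ ·)) (c : Char) :
    stepA (stepA st c) c = st := by
  unfold stepA
  by_cases hl : st.getLast? = some c
  · rw [if_pos hl]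
    rcases List.eq_nil_or_concat st with rfl | ⟨ys, y, rfl⟩
    · simp at hl
    · simp only [List.concat_eq_append] at h hl ⊢
      simp at hl
      subst hl
      rw [show (ys ++ [y]).dropLast = ys from by simp]
      have hy : ys.getLast? ≠ some y := by
        intro he
        rw [List.isChain_append] at h
        exact h.2.2 y he y (by simp) rfl
      rw [if_neg hy]
  · rw [if_neg hl, if_pos (by simp)]
    simp

theorem foldl_passOnce {st : List Char} (h : st.IsChain (· ≠ ·)) (l : List Char) :
    List.foldl stepA st l = List.foldl stepA st (passOnce l).1 := by
  induction l using passOnce.induct generalizing st with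
  | case1 b rest ih =>
      simp only [passOnce, List.foldl_cons]
      rw [stepA_cancel h]
      exact ih h
  | case2 a b rest hab ih =>
      simp only [passOnce, if_neg hab, List.foldl_cons]
      exact ih (stepA_good h a)
  | case3 a => simp [passOnce]
  | case4 => simp [passOnce]

theorem foldl_reduceLoop {st : List Char} (h : st.IsChain (· ≠ ·)) (l : List Char) :
    List.foldl stepA st l = List.foldl stepA st (reduceLoop l) := by
  induction l using reduceLoop.induct with
  | case1 l hc ih =>
      rw [reduceLoop, dif_pos hc, foldl_passOnce h l, ih]
  | case2 l hc =>
      rw [reduceLoop, dif_neg hc, foldl_passOnce h l]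

theorem passOnce_nochange (l : List Char) (h : (passOnce l).2 = false) :
    (passOnce l).1 = l ∧ l.IsChain (· ≠ ·) := by
  induction l using passOnce.induct with
  | case1 b rest ih => simp [passOnce] at h
  | case2 a b rest hab ih =>
      simp only [passOnce, if_neg hab] at h ⊢
      obtain ⟨h1, h2⟩ := ih h
      refine ⟨by rw [h1], List.isChain_cons.2 ⟨?_, h2⟩⟩
      intro y hy
      simp at hy
      subst hy
      exact hab
  | case3 a => simp [passOnce]
  | case4 => simp [passOnce]

theorem reduceLoop_nf (l : List Char) : (reduceLoop l).IsChain (· ≠ ·) := by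
  induction l using reduceLoop.induct with
  | case1 l hc ih => rw [reduceLoop, dif_pos hc]; exact ih
  | case2 l hc =>
      rw [reduceLoop, dif_neg hc]
      have := passOnce_nochange l (by simpa using hc)
      rw [this.1]; exact this.2

theorem foldl_of_chain (st l : List Char) (h : (st ++ l).IsChain (· ≠ ·)) :
    List.foldl stepA st l = st ++ l := by
  induction l generalizing st with
  | nil => simp
  | cons c rest ih =>
      have hlast : st.getLast? ≠ some c := by
        intro he
        rw [show st ++ c :: rest = (st ++ [c]) ++ rest by simp] at h
        rw [List.isChain_append, List.isChain_append] at h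
        exact h.1.2.2 c he c (by simp) rfl
      simp only [List.foldl_cons]
      rw [show stepA st c = st ++ [c] by unfold stepA; rw [if_neg hlast]]
      rw [ih (st ++ [c]) (by simpa using h)]
      simp

-- ===== VERDICT (by name: the statement is the Claim_ definition above) =====
theorem solution_spec : Claim_equal_solution := by
  intro s _
  unfold Spec_solution solution solution_alt
  have hfold :
      (PySem.List.pyRange 0 (PySem.Str.len s) 1).foldl
        (fun stack i =>
          if stack ≠ [] then
            if PySem.List.pyGetD stack (-1) ' ' ≠ PySem.List.pyGetD s.toList i ' ' then
              stack ++ [PySem.List.pyGetD s.toList i ' ']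
            else stack.dropLast
          else stack ++ [PySem.List.pyGetD s.toList i ' '])
        ([] : List Char)
      = List.foldl stepA [] s.toList := by
    rw [PySem.Str.len_eq]
    rw [PySem.List.foldl_pyRange_zero_pyGetD' s.toList ' '
      (fun (stack : List Char) (c : Char) =>
        if stack ≠ [] then
          if PySem.List.pyGetD stack (-1) ' ' ≠ c then stack ++ [c] else stack.dropLast
        else stack ++ [c]) ([] : List Char)]
    exact PySem.List.foldl_congr_mem _ _ _ _ (fun acc x _ => stepA_eq acc x)
  simp only [hfold]
  rw [foldl_reduceLoop (by simp) s.toList]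
  rw [show List.foldl stepA [] (reduceLoop s.toList) = reduceLoop s.toList from
    by simpa using foldl_of_chain [] (reduceLoop s.toList) (by simpa using reduceLoop_nf s.toList)]
  rcases eq_or_ne (reduceLoop s.toList) [] with he | he
  · simp [he]
  · simp [he, List.length_eq_zero_iff]
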